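-- pv_equiv track=rewrite | github.com/JMocklerUMD/2025_Hypersonic_BL_ID | Results_utils.py | confusion_results
-- ===== SOURCE A (Python) =====
-- def confusion_results(prediction, truth):
--     """
--     On a frame-level, computes the confusion statistics between the NN prediction (either processed or un) and the ground truth
--
--     INPUTS
--     ------------------
--     prediction: array,
--         0/1 binary classifier prediction with length aligned with the number of slices in a frame
--
--     truth: array,
--         0/1 binary ground truth (e.g human labeled) prediction with length aligned with the number of slices in a frame
--
--     OUTPUTS
--     ------------------
--     n11, n10, n01, n00: ints,
--         confusion statistics corresponding to the entire frame. n11 = TP, n00 = TN, n10 = FN, n01 = FP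
--     """
--     n00, n01, n10, n11 = 0, 0, 0, 0
--
--     for i, label_true in enumerate(truth):
--         label_pred = prediction[i]
--
--         if label_true == 0:
--             if label_pred == 0:
--                 n00 += 1
--             if label_pred == 1:
--                 n01 += 1
--         elif label_true == 1:
--             if label_pred == 0:
--                 n10 += 1
--             if label_pred == 1:
--                 n11 += 1
--
--     return n11, n10, n01, n00
-- ===== SOURCE B (Python) =====
-- def confusion_results(prediction, truth):
--     pairs = [(label_true, prediction[i]) for i, label_true in enumerate(truth)]
--     return (pairs.count((1, 1)), pairs.count((1, 0)),
--             pairs.count((0, 1)), pairs.count((0, 0)))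
-- ===== Notes on version B (the rewrite author's own statement) =====
-- stated objective: idiomatic
-- what changed: drops the running four-counter accumulator with nested if-branches: B materializes the (truth[i], prediction[i]) pair list once and obtains each confusion cell with a separate list.count pass
import Mathlib
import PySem

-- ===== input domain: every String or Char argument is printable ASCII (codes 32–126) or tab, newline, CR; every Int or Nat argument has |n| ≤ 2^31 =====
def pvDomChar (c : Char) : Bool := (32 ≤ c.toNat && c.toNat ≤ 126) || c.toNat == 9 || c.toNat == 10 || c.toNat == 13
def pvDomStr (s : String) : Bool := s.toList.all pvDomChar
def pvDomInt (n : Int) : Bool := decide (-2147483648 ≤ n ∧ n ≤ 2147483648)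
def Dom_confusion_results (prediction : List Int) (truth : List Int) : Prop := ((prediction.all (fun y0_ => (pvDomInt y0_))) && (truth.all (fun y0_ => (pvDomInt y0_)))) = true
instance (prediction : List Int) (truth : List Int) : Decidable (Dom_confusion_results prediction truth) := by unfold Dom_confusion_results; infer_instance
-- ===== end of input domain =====

-- B replaces A's single-pass four-counter loop by building the pair list once and counting each cell with a separate count pass (idiomatic; same cost).

-- ===== PORT A =====
-- A's loop body on state (n00, n01, n10, n11) given the pair (label_true, label_pred)
def stepA (s : Int × Int × Int × Int) (pr : Int × Int) : Int × Int × Int × Int :=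
  if pr.1 = 0 then
    ((if pr.2 = 0 then s.1 + 1 else s.1), (if pr.2 = 1 then s.2.1 + 1 else s.2.1), s.2.2.1, s.2.2.2)
  else if pr.1 = 1 then
    (s.1, s.2.1, (if pr.2 = 0 then s.2.2.1 + 1 else s.2.2.1), (if pr.2 = 1 then s.2.2.2 + 1 else s.2.2.2))
  else s

-- prediction[i] is ported as pyGetD with default 0: exact under Pre_ (every index is in range);
-- Python raises IndexError exactly on the inputs Pre_ excludes.
def confusion_results (prediction : List Int) (truth : List Int) : Int × Int × Int × Int :=
  let s := (PySem.List.enumerate truth 0).foldl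
    (fun s pr => stepA s (pr.2, PySem.List.pyGetD prediction pr.1 0)) (0, 0, 0, 0)
  (s.2.2.2, s.2.2.1, s.2.1, s.1)

-- ===== PORT B =====
def confusion_results_alt (prediction : List Int) (truth : List Int) : Int × Int × Int × Int :=
  let pairs : List (Int × Int) := (PySem.List.enumerate truth 0).map
    (fun pr => (pr.2, PySem.List.pyGetD prediction pr.1 0))
  (PySem.List.count pairs (1, 1), PySem.List.count pairs (1, 0),
   PySem.List.count pairs (0, 1), PySem.List.count pairs (0, 0))

-- ===== PRECONDITION & SPEC =====
-- A (and B) raise IndexError when truth is longer than prediction; those inputs are excluded.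
def Pre_confusion_results (prediction : List Int) (truth : List Int) : Prop :=
  truth.length ≤ prediction.length
instance (prediction : List Int) (truth : List Int) : Decidable (Pre_confusion_results prediction truth) := by unfold Pre_confusion_results; infer_instance

def pvWitness_confusion_results : List Int × List Int := ([1, 0, 1], [0, 1, 1])

def Spec_confusion_results (prediction : List Int) (truth : List Int) (out : Int × Int × Int × Int) : Prop := out = confusion_results_alt prediction truth
instance (prediction : List Int) (truth : List Int) (out : Int × Int × Int × Int) : Decidable (Spec_confusion_results prediction truth out) := by unfold Spec_confusion_results; infer_instance

-- ===== CLAIM (what is proved, stated in full; the proofs are below) =====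
def Claim_equal_confusion_results : Prop := ∀ (prediction : List Int) (truth : List Int), Dom_confusion_results prediction truth → Pre_confusion_results prediction truth → Spec_confusion_results prediction truth (confusion_results prediction truth)

-- ===== LEMMAS AND PROOFS =====

-- A's fold over a pair list counts the four 0/1 keys.
lemma foldA_count (l : List (Int × Int)) : ∀ (a b c d : Int),
    l.foldl stepA (a, b, c, d) =
      (a + l.count (0, 0), b + l.count (0, 1), c + l.count (1, 0), d + l.count (1, 1)) := by
  induction l with
  | nil => intro a b c d; simp
  | cons pr l ih =>
    intro a b c d
    obtain ⟨lt, lp⟩ := pr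
    rw [List.foldl_cons]
    simp only [stepA]
    split_ifs with h0 hp0 hp1 hp1 h1 hq0 hq1 hq1 <;> rw [ih] <;>
      simp_all [List.count_cons, Prod.ext_iff] <;> omega

-- ===== VERDICT (by name: the statement is the Claim_ definition above) =====
theorem confusion_results_spec : Claim_equal_confusion_results := by
  intro prediction truth _ _
  unfold Spec_confusion_results confusion_results confusion_results_alt
  have hmapA := (List.foldl_map
    (f := fun (pr : Int × Int) => ((pr.2, PySem.List.pyGetD prediction pr.1 0) : Int × Int))
    (g := stepA) (l := PySem.List.enumerate truth 0) (init := ((0, 0, 0, 0) : Int × Int × Int × Int)))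
  simp only [← hmapA]
  simp [foldA_count, PySem.List.count]
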